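-- pv_equiv track=rewrite | github.com/xiaonanji/ask_jeremy_v3 | backend/src/ask_jeremy_backend/warehouse_policy.py | _mask_sql_comments_and_literals
-- ===== SOURCE A (Python) =====
-- def _mask_sql_comments_and_literals(query: str) -> str:
--     chars = list(query)
--     index = 0
--     while index < len(chars):
--         char = chars[index]
--         next_char = chars[index + 1] if index + 1 < len(chars) else ""
--
--         if char == "-" and next_char == "-":
--             start = index
--             index += 2
--             while index < len(chars) and chars[index] not in "\r\n":
--                 index += 1
--             for pos in range(start, index):
--                 chars[pos] = " "
--             continue
--
--         if char == "/" and next_char == "*":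
--             start = index
--             index += 2
--             while index + 1 < len(chars) and not (chars[index] == "*" and chars[index + 1] == "/"):
--                 index += 1
--             index = min(len(chars), index + 2)
--             for pos in range(start, index):
--                 chars[pos] = " "
--             continue
--
--         if char == "'":
--             start = index
--             index += 1
--             while index < len(chars):
--                 if chars[index] == "'" and index + 1 < len(chars) and chars[index + 1] == "'":
--                     index += 2
--                     continue
--                 if chars[index] == "'":
--                     index += 1
--                     break
--                 index += 1
--             for pos in range(start, min(index, len(chars))):
--                 chars[pos] = " "
--             continue
--
--         index += 1
--
--     return "".join(chars)
-- ===== SOURCE B (Python) =====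
-- def _mask_sql_comments_and_literals(query: str) -> str:
--     NORMAL, LINE, BLOCK, STRING = 0, 1, 2, 3
--     out = []
--     state = NORMAL
--     i = 0
--     n = len(query)
--     while i < n:
--         c = query[i]
--         if state == NORMAL:
--             if c == "-" and i + 1 < n and query[i + 1] == "-":
--                 out.append(" ")
--                 out.append(" ")
--                 state = LINE
--                 i += 2
--             elif c == "/" and i + 1 < n and query[i + 1] == "*":
--                 out.append(" ")
--                 out.append(" ")
--                 state = BLOCK
--                 i += 2
--             elif c == "'":
--                 out.append(" ")
--                 state = STRING
--                 i += 1
--             else: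
--                 out.append(c)
--                 i += 1
--         elif state == LINE:
--             if c in "\r\n":
--                 out.append(c)
--                 state = NORMAL
--             else:
--                 out.append(" ")
--             i += 1
--         elif state == BLOCK:
--             if c == "*" and i + 1 < n and query[i + 1] == "/":
--                 out.append(" ")
--                 out.append(" ")
--                 state = NORMAL
--                 i += 2
--             else:
--                 out.append(" ")
--                 i += 1
--         else:  # STRING
--             if c == "'":
--                 if i + 1 < n and query[i + 1] == "'":
--                     out.append(" ")
--                     out.append(" ")
--                     i += 2
--                 else:
--                     out.append(" ")
--                     state = NORMAL
--                     i += 1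
--             else:
--                 out.append(" ")
--                 i += 1
--     return "".join(out)
-- ===== Notes on version B (the rewrite author's own statement) =====
-- stated objective: simpler
-- what changed: Replaced A's index-jumping loop with inner scan loops and back-filling of masked ranges by a single forward-pass finite state machine (NORMAL/LINE_COMMENT/BLOCK_COMMENT/STRING) that appends either a space or the original character as it goes, with no back-filling or range arithmetic.
import Mathlib
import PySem

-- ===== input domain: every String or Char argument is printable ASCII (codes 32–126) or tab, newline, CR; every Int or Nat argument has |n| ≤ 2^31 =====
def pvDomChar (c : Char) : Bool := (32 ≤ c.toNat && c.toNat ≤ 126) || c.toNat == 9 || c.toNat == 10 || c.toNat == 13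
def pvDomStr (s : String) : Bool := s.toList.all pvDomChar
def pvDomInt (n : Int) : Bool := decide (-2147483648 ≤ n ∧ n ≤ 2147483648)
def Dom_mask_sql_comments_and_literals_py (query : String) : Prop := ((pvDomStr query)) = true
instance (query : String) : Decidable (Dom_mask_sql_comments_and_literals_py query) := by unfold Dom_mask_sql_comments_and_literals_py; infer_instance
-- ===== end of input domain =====

-- B replaces A's index-jumping loop (inner scans + back-filling ranges with spaces) by a single
-- forward-pass finite state machine that emits each output character once; objective: simpler.

-- ===== PORT A =====
-- inner `while` of the line-comment branch: advance until a '\r'/'\n' or the end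
-- (fuel bounds the iteration count; callers pass enough fuel for the whole scan)
def pvScanLine (chars : List Char) (fuel index : Nat) : Nat :=
  match fuel with
  | 0 => index
  | fuel + 1 =>
    if index < chars.length then
      if chars.getD index ' ' = '\r' ∨ chars.getD index ' ' = '\n' then index
      else pvScanLine chars fuel (index + 1)
    else index

-- inner `while` of the block-comment branch: advance until "*/" starts at index (last char excluded)
def pvScanBlock (chars : List Char) (fuel index : Nat) : Nat :=
  match fuel with
  | 0 => index
  | fuel + 1 =>
    if index + 1 < chars.length then
      if chars.getD index ' ' = '*' ∧ chars.getD (index + 1) ' ' = '/' then index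
      else pvScanBlock chars fuel (index + 1)
    else index

-- inner `while` of the string-literal branch: skip '' pairs, stop after a lone closing quote
def pvScanStr (chars : List Char) (fuel index : Nat) : Nat :=
  match fuel with
  | 0 => index
  | fuel + 1 =>
    if index < chars.length then
      if chars.getD index ' ' = '\'' ∧ index + 1 < chars.length ∧ chars.getD (index + 1) ' ' = '\'' then
        pvScanStr chars fuel (index + 2)
      else if chars.getD index ' ' = '\'' then index + 1
      else pvScanStr chars fuel (index + 1)
    else index

-- `for pos in range(start, stop): chars[pos] = " "`, as `count = stop - start` assignments
def pvFill (chars : List Char) (pos count : Nat) : List Char :=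
  match count with
  | 0 => chars
  | c + 1 => pvFill (chars.set pos ' ') (pos + 1) c

-- outer `while index < len(chars)` of A (fuel = chars.length at entry suffices: index grows each pass)
def pvMaskA (chars : List Char) (fuel index : Nat) : List Char :=
  match fuel with
  | 0 => chars
  | fuel + 1 =>
    if index < chars.length then
      let char := chars.getD index ' '
      if char = '-' ∧ index + 1 < chars.length ∧ chars.getD (index + 1) ' ' = '-' then
        let j := pvScanLine chars chars.length (index + 2)
        pvMaskA (pvFill chars index (j - index)) fuel j
      else if char = '/' ∧ index + 1 < chars.length ∧ chars.getD (index + 1) ' ' = '*' then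
        let j := min chars.length (pvScanBlock chars chars.length (index + 2) + 2)
        pvMaskA (pvFill chars index (j - index)) fuel j
      else if char = '\'' then
        let j := pvScanStr chars chars.length (index + 1)
        pvMaskA (pvFill chars index (min j chars.length - index)) fuel j
      else
        pvMaskA chars fuel (index + 1)
    else chars

def mask_sql_comments_and_literals_py (query : String) : String :=
  String.ofList (pvMaskA query.toList query.toList.length 0)

-- ===== PORT B =====
inductive PvMState : Type
  | normal | line | block | str
deriving DecidableEq, Repr

-- the single `while i < n` loop of B, with its four-way state dispatch
-- (fuel bounds the iteration count; n = q.length at entry suffices: i grows each pass)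
def pvMaskB (q : List Char) (st : PvMState) (fuel i : Nat) (out : List Char) : List Char :=
  match fuel with
  | 0 => out
  | fuel + 1 =>
    if i < q.length then
      let c := q.getD i ' '
      match st with
      | .normal =>
        if c = '-' ∧ i + 1 < q.length ∧ q.getD (i + 1) ' ' = '-' then
          pvMaskB q .line fuel (i + 2) (out ++ [' ', ' '])
        else if c = '/' ∧ i + 1 < q.length ∧ q.getD (i + 1) ' ' = '*' then
          pvMaskB q .block fuel (i + 2) (out ++ [' ', ' '])
        else if c = '\'' then
          pvMaskB q .str fuel (i + 1) (out ++ [' '])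
        else
          pvMaskB q .normal fuel (i + 1) (out ++ [c])
      | .line =>
        if c = '\r' ∨ c = '\n' then pvMaskB q .normal fuel (i + 1) (out ++ [c])
        else pvMaskB q .line fuel (i + 1) (out ++ [' '])
      | .block =>
        if c = '*' ∧ i + 1 < q.length ∧ q.getD (i + 1) ' ' = '/' then
          pvMaskB q .normal fuel (i + 2) (out ++ [' ', ' '])
        else pvMaskB q .block fuel (i + 1) (out ++ [' '])
      | .str =>
        if c = '\'' then
          if i + 1 < q.length ∧ q.getD (i + 1) ' ' = '\'' then
            pvMaskB q .str fuel (i + 2) (out ++ [' ', ' '])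
          else pvMaskB q .normal fuel (i + 1) (out ++ [' '])
        else pvMaskB q .str fuel (i + 1) (out ++ [' '])
    else out

def mask_sql_comments_and_literals_py_alt (query : String) : String :=
  String.ofList (pvMaskB query.toList .normal query.toList.length 0 [])

-- ===== PRECONDITION & SPEC =====
def Spec_mask_sql_comments_and_literals_py (query : String) (out : String) : Prop := out = mask_sql_comments_and_literals_py_alt query
instance (query : String) (out : String) : Decidable (Spec_mask_sql_comments_and_literals_py query out) := by unfold Spec_mask_sql_comments_and_literals_py; infer_instance

-- ===== CLAIM (what is proved, stated in full; the proofs are below) =====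
def Claim_equal_mask_sql_comments_and_literals_py : Prop := ∀ (query : String), Dom_mask_sql_comments_and_literals_py query → Spec_mask_sql_comments_and_literals_py query (mask_sql_comments_and_literals_py query)

-- ===== LEMMAS AND PROOFS =====

theorem pvScanLine_ge (chars : List Char) (fuel index : Nat) : index ≤ pvScanLine chars fuel index := by
  induction fuel generalizing index with
  | zero => simp [pvScanLine]
  | succ fuel ih =>
      simp only [pvScanLine]
      split_ifs
      · omega
      · exact le_trans (by omega) (ih (index + 1))
      · omega

theorem pvScanLine_le (chars : List Char) (fuel index : Nat) (h : index ≤ chars.length) :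
    pvScanLine chars fuel index ≤ chars.length := by
  induction fuel generalizing index with
  | zero => simpa [pvScanLine]
  | succ fuel ih =>
      simp only [pvScanLine]
      split_ifs with h1 h2
      · omega
      · exact ih (index + 1) (by omega)
      · omega

theorem pvScanLine_irrel (chars : List Char) (f₁ f₂ index : Nat)
    (h₁ : chars.length - index ≤ f₁) (h₂ : chars.length - index ≤ f₂) :
    pvScanLine chars f₁ index = pvScanLine chars f₂ index := by
  induction f₁ generalizing f₂ index with
  | zero =>
      cases f₂ with
      | zero => rfl
      | succ f₂ => simp [pvScanLine, show ¬ index < chars.length by omega]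
  | succ f₁ ih =>
      cases f₂ with
      | zero => simp [pvScanLine, show ¬ index < chars.length by omega]
      | succ f₂ =>
          simp only [pvScanLine]
          split_ifs
          · rfl
          · exact ih f₂ (index + 1) (by omega) (by omega)
          · rfl

theorem pvScanBlock_ge (chars : List Char) (fuel index : Nat) : index ≤ pvScanBlock chars fuel index := by
  induction fuel generalizing index with
  | zero => simp [pvScanBlock]
  | succ fuel ih =>
      simp only [pvScanBlock]
      split_ifs
      · omega
      · exact le_trans (by omega) (ih (index + 1))
      · omega

theorem pvScanBlock_irrel (chars : List Char) (f₁ f₂ index : Nat)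
    (h₁ : chars.length - index ≤ f₁) (h₂ : chars.length - index ≤ f₂) :
    pvScanBlock chars f₁ index = pvScanBlock chars f₂ index := by
  induction f₁ generalizing f₂ index with
  | zero =>
      cases f₂ with
      | zero => rfl
      | succ f₂ => simp [pvScanBlock, show ¬ index + 1 < chars.length by omega]
  | succ f₁ ih =>
      cases f₂ with
      | zero => simp [pvScanBlock, show ¬ index + 1 < chars.length by omega]
      | succ f₂ =>
          simp only [pvScanBlock]
          split_ifs
          · rfl
          · exact ih f₂ (index + 1) (by omega) (by omega)
          · rfl

theorem pvScanStr_ge (chars : List Char) (fuel index : Nat) : index ≤ pvScanStr chars fuel index := by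
  induction fuel generalizing index with
  | zero => simp [pvScanStr]
  | succ fuel ih =>
      simp only [pvScanStr]
      split_ifs
      · exact le_trans (by omega) (ih (index + 2))
      · omega
      · exact le_trans (by omega) (ih (index + 1))
      · omega

theorem pvScanStr_le (chars : List Char) (fuel index : Nat) (h : index ≤ chars.length) :
    pvScanStr chars fuel index ≤ chars.length := by
  induction fuel generalizing index with
  | zero => simpa [pvScanStr]
  | succ fuel ih =>
      simp only [pvScanStr]
      split_ifs with h1 h2 h3
      · exact ih (index + 2) (by omega)
      · omega
      · exact ih (index + 1) (by omega)
      · omega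

theorem pvScanStr_irrel (chars : List Char) (f₁ f₂ index : Nat)
    (h₁ : chars.length - index ≤ f₁) (h₂ : chars.length - index ≤ f₂) :
    pvScanStr chars f₁ index = pvScanStr chars f₂ index := by
  induction f₁ generalizing f₂ index with
  | zero =>
      cases f₂ with
      | zero => rfl
      | succ f₂ => simp [pvScanStr, show ¬ index < chars.length by omega]
  | succ f₁ ih =>
      cases f₂ with
      | zero => simp [pvScanStr, show ¬ index < chars.length by omega]
      | succ f₂ =>
          simp only [pvScanStr]
          split_ifs with h1 h2
          · exact ih f₂ (index + 2) (by omega) (by omega)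
          · rfl
          · exact ih f₂ (index + 1) (by omega) (by omega)
          · rfl

theorem pvFill_length (chars : List Char) (pos count : Nat) :
    (pvFill chars pos count).length = chars.length := by
  induction count generalizing chars pos with
  | zero => rfl
  | succ c ih => simp [pvFill, ih]

theorem pvFill_getD_ge (chars : List Char) (pos count k : Nat) (hk : pos + count ≤ k) :
    (pvFill chars pos count).getD k ' ' = chars.getD k ' ' := by
  induction count generalizing chars pos with
  | zero => rfl
  | succ c ih =>
      rw [pvFill, ih _ _ (by omega)]
      simp [List.getD_eq_getElem?_getD, List.getElem?_set_ne (by omega : pos ≠ k)]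

theorem pvFill_take (chars : List Char) (pos count : Nat) (h2 : pos + count ≤ chars.length) :
    (pvFill chars pos count).take (pos + count) = chars.take pos ++ List.replicate count ' ' := by
  induction count generalizing chars pos with
  | zero => simp [pvFill]
  | succ c ih =>
      rw [pvFill, show pos + (c + 1) = (pos + 1) + c by omega,
        ih _ _ (by simp only [List.length_set]; omega)]
      have hp : pos < chars.length := by omega
      have : (chars.set pos ' ').take (pos + 1) = chars.take pos ++ [' '] := by
        rw [List.take_add_one]
        congr 1
        · rw [List.take_set]
          exact List.set_eq_of_length_le (by simp)
        · simp [List.getElem?_set_self hp]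
      rw [this, List.append_assoc]
      congr 1

theorem pvMaskB_stop (q : List Char) (st : PvMState) (fuel i : Nat) (out : List Char)
    (h : q.length ≤ i) : pvMaskB q st fuel i out = out := by
  cases fuel <;> simp [pvMaskB, show ¬ i < q.length by omega]

theorem pvMaskB_irrel (q : List Char) (st : PvMState) (f₁ f₂ i : Nat) (out : List Char)
    (h₁ : q.length - i ≤ f₁) (h₂ : q.length - i ≤ f₂) :
    pvMaskB q st f₁ i out = pvMaskB q st f₂ i out := by
  induction f₁ generalizing f₂ st i out with
  | zero => rw [pvMaskB_stop _ _ _ _ _ (by omega), pvMaskB_stop _ _ _ _ _ (by omega)]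
  | succ f₁ ih =>
      by_cases hi : i < q.length
      · cases f₂ with
        | zero => omega
        | succ f₂ =>
            cases st <;> simp only [pvMaskB, if_pos hi] <;> split_ifs <;>
              exact ih _ f₂ _ _ (by omega) (by omega)
      · rw [pvMaskB_stop _ _ _ _ _ (by omega), pvMaskB_stop _ _ _ _ _ (by omega)]

theorem pvMaskB_append (q : List Char) (st : PvMState) (fuel i : Nat) (out₁ out₂ : List Char) :
    pvMaskB q st fuel i (out₁ ++ out₂) = out₁ ++ pvMaskB q st fuel i out₂ := by
  induction fuel generalizing st i out₂ with
  | zero => rfl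
  | succ fuel ih =>
      by_cases hi : i < q.length
      · cases st <;> simp only [pvMaskB, if_pos hi] <;> split_ifs <;>
          rw [List.append_assoc] <;> exact ih _ _ _
      · rw [pvMaskB_stop _ _ _ _ _ (by omega), pvMaskB_stop _ _ _ _ _ (by omega)]

theorem pvMaskB_out (q : List Char) (st : PvMState) (fuel i : Nat) (out : List Char) :
    pvMaskB q st fuel i out = out ++ pvMaskB q st fuel i [] := by
  simpa using pvMaskB_append q st fuel i out []

theorem pvMaskB_congr (q₁ q₂ : List Char) (st : PvMState) (fuel i : Nat) (out : List Char)
    (hlen : q₁.length = q₂.length) (hget : ∀ k, i ≤ k → q₁.getD k ' ' = q₂.getD k ' ') :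
    pvMaskB q₁ st fuel i out = pvMaskB q₂ st fuel i out := by
  induction fuel generalizing st i out with
  | zero => rfl
  | succ fuel ih =>
      by_cases hi : i < q₁.length
      · have e0 := (hget i le_rfl).symm
        have e1 := (hget (i + 1) (by omega)).symm
        cases st <;> simp only [pvMaskB, if_pos hi, e0, e1, ← hlen] <;>
          split_ifs <;>
          exact ih _ _ _ (fun k hk => hget k (by omega))
      · rw [pvMaskB_stop _ _ _ _ _ (by omega), pvMaskB_stop _ _ _ _ _ (by omega)]

-- bridge: the LINE state masks exactly up to pvScanLine, then returns to NORMAL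
theorem pvLine_bridge (q : List Char) (fuel i : Nat) (hf : q.length - i ≤ fuel) :
    pvMaskB q .line fuel i [] =
      List.replicate (pvScanLine q fuel i - i) ' ' ++
        pvMaskB q .normal q.length (pvScanLine q fuel i) [] := by
  induction fuel generalizing i with
  | zero =>
      rw [pvMaskB_stop _ _ _ _ _ (by omega)]
      simp [pvScanLine, pvMaskB_stop _ _ _ _ _ (by omega : q.length ≤ i)]
  | succ fuel ih =>
      by_cases hi : i < q.length
      · by_cases hnl : q.getD i ' ' = '\r' ∨ q.getD i ' ' = '\n'
        · simp only [pvScanLine, if_pos hi, if_pos hnl]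
          rw [pvMaskB_irrel q .normal q.length (fuel + 1) i [] (by omega) (by omega)]
          simp only [pvMaskB, if_pos hi]
          rw [if_pos hnl,
            if_neg (by rintro ⟨h1, -, -⟩; rcases hnl with h' | h' <;> rw [h'] at h1 <;> exact absurd h1 (by decide)),
            if_neg (by rintro ⟨h1, -, -⟩; rcases hnl with h' | h' <;> rw [h'] at h1 <;> exact absurd h1 (by decide)),
            if_neg (by intro h1; rcases hnl with h' | h' <;> rw [h'] at h1 <;> exact absurd h1 (by decide))]
          simp
        · simp only [pvScanLine, if_pos hi, if_neg hnl]
          conv_lhs => rw [pvMaskB]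
          simp only [if_pos hi]
          rw [if_neg hnl, pvMaskB_out, ih (i + 1) (by omega)]
          have hge := pvScanLine_ge q fuel (i + 1)
          rw [show pvScanLine q fuel (i + 1) - i = (pvScanLine q fuel (i + 1) - (i + 1)) + 1 by omega,
            List.replicate_succ]
          simp
      · rw [pvMaskB_stop _ _ _ _ _ (by omega)]
        simp only [pvScanLine, if_neg hi]
        rw [pvMaskB_stop _ _ _ _ _ (by omega)]
        simp

theorem pvBlock_bridge (q : List Char) (fuel i : Nat) (hf : q.length - i ≤ fuel) :
    pvMaskB q .block fuel i [] =
      List.replicate (min q.length (pvScanBlock q fuel i + 2) - i) ' ' ++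
        pvMaskB q .normal q.length (min q.length (pvScanBlock q fuel i + 2)) [] := by
  induction fuel generalizing i with
  | zero =>
      rw [pvMaskB_stop _ _ _ _ _ (by omega)]
      simp [pvScanBlock, pvMaskB_stop _ _ _ _ _ (by omega : q.length ≤ min q.length (i + 2)),
        show min q.length (i + 2) - i = 0 by omega]
  | succ fuel ih =>
      by_cases hi : i < q.length
      · by_cases hb : i + 1 < q.length
        · by_cases hc : q.getD i ' ' = '*' ∧ q.getD (i + 1) ' ' = '/'
          · simp only [pvScanBlock, if_pos hb, if_pos hc]
            conv_lhs => rw [pvMaskB]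
            simp only [if_pos hi]
            rw [if_pos ⟨hc.1, hb, hc.2⟩, pvMaskB_out,
              pvMaskB_irrel q .normal fuel q.length (i + 2) [] (by omega) (by omega),
              show min q.length (i + 2) = i + 2 by omega, show i + 2 - i = 2 by omega]
            simp [List.replicate_succ]
          · simp only [pvScanBlock, if_pos hb, if_neg hc]
            conv_lhs => rw [pvMaskB]
            simp only [if_pos hi]
            rw [if_neg (by rintro ⟨h1, -, h2⟩; exact hc ⟨h1, h2⟩), pvMaskB_out, ih (i + 1) (by omega)]
            have hge := pvScanBlock_ge q fuel (i + 1)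
            rw [show min q.length (pvScanBlock q fuel (i + 1) + 2) - i
                  = (min q.length (pvScanBlock q fuel (i + 1) + 2) - (i + 1)) + 1 by omega,
              List.replicate_succ]
            simp
        · simp only [pvScanBlock, if_neg hb]
          conv_lhs => rw [pvMaskB]
          simp only [if_pos hi]
          rw [if_neg (by rintro ⟨-, h1, -⟩; exact hb h1), pvMaskB_out,
            pvMaskB_stop _ _ _ _ _ (by omega : q.length ≤ i + 1),
            pvMaskB_stop _ _ _ _ _ (by omega : q.length ≤ min q.length (i + 2)),
            show min q.length (i + 2) - i = 1 by omega]
          simp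
      · rw [pvMaskB_stop _ _ _ _ _ (by omega)]
        simp only [pvScanBlock, if_neg (show ¬ i + 1 < q.length by omega)]
        rw [pvMaskB_stop _ _ _ _ _ (by omega : q.length ≤ min q.length (i + 2))]
        simp [show min q.length (i + 2) - i = 0 by omega]

theorem pvStr_bridge (q : List Char) (fuel i : Nat) (hf : q.length - i ≤ fuel) :
    pvMaskB q .str fuel i [] =
      List.replicate (pvScanStr q fuel i - i) ' ' ++
        pvMaskB q .normal q.length (pvScanStr q fuel i) [] := by
  induction fuel generalizing i with
  | zero =>
      rw [pvMaskB_stop _ _ _ _ _ (by omega)]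
      simp [pvScanStr, pvMaskB_stop _ _ _ _ _ (by omega : q.length ≤ i)]
  | succ fuel ih =>
      by_cases hi : i < q.length
      · by_cases h1 : q.getD i ' ' = '\'' ∧ i + 1 < q.length ∧ q.getD (i + 1) ' ' = '\''
        · simp only [pvScanStr, if_pos hi, if_pos h1]
          conv_lhs => rw [pvMaskB]
          simp only [if_pos hi]
          rw [if_pos h1.1, if_pos ⟨h1.2.1, h1.2.2⟩, pvMaskB_out, ih (i + 2) (by omega)]
          have hge := pvScanStr_ge q fuel (i + 2)
          rw [show pvScanStr q fuel (i + 2) - i = (pvScanStr q fuel (i + 2) - (i + 2)) + 2 by omega]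
          simp [List.replicate_succ]
        · by_cases hq : q.getD i ' ' = '\''
          · simp only [pvScanStr, if_pos hi, if_neg h1, if_pos hq]
            conv_lhs => rw [pvMaskB]
            simp only [if_pos hi]
            rw [if_pos hq, if_neg (fun hp => h1 ⟨hq, hp.1, hp.2⟩), pvMaskB_out,
              pvMaskB_irrel q .normal fuel q.length (i + 1) [] (by omega) (by omega),
              show i + 1 - i = 1 by omega]
            simp [List.replicate_succ]
          · simp only [pvScanStr, if_pos hi, if_neg h1, if_neg hq]
            conv_lhs => rw [pvMaskB]
            simp only [if_pos hi]
            rw [if_neg hq, pvMaskB_out, ih (i + 1) (by omega)]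
            have hge := pvScanStr_ge q fuel (i + 1)
            rw [show pvScanStr q fuel (i + 1) - i = (pvScanStr q fuel (i + 1) - (i + 1)) + 1 by omega,
              List.replicate_succ]
            simp
      · rw [pvMaskB_stop _ _ _ _ _ (by omega)]
        simp only [pvScanStr, if_neg hi]
        rw [pvMaskB_stop _ _ _ _ _ (by omega)]
        simp

-- main invariant: A's loop from index equals the untouched prefix plus B's machine from index
theorem pvMask_main (chars : List Char) (fuel index : Nat) (hf : chars.length - index ≤ fuel) :
    pvMaskA chars fuel index = chars.take index ++ pvMaskB chars .normal fuel index [] := by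
  induction fuel generalizing chars index with
  | zero =>
      simp [pvMaskA, pvMaskB, List.take_of_length_le (by omega : chars.length ≤ index)]
  | succ fuel ih =>
      by_cases hi : index < chars.length
      · by_cases h1 : chars.getD index ' ' = '-' ∧ index + 1 < chars.length ∧ chars.getD (index + 1) ' ' = '-'
        · have hge := pvScanLine_ge chars chars.length (index + 2)
          have hle := pvScanLine_le chars chars.length (index + 2) (by omega)
          conv_lhs => rw [pvMaskA]
          simp only [if_pos hi]
          rw [if_pos h1,
            ih (pvFill chars index (pvScanLine chars chars.length (index + 2) - index))
              (pvScanLine chars chars.length (index + 2))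
              (by rw [pvFill_length]; omega)]
          have ht := pvFill_take chars index (pvScanLine chars chars.length (index + 2) - index) (by omega)
          rw [show index + (pvScanLine chars chars.length (index + 2) - index)
                = pvScanLine chars chars.length (index + 2) by omega] at ht
          rw [ht,
            pvMaskB_congr _ chars .normal fuel _ [] (pvFill_length _ _ _)
              (fun k hk => pvFill_getD_ge _ _ _ _ (by omega))]
          conv_rhs => rw [pvMaskB]
          simp only [if_pos hi]
          rw [if_pos h1]
          conv_rhs => rw [pvMaskB_out, pvLine_bridge chars fuel (index + 2) (by omega)]
          rw [pvScanLine_irrel chars fuel chars.length (index + 2) (by omega) (by omega),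
            pvMaskB_irrel chars .normal fuel chars.length (pvScanLine chars chars.length (index + 2)) [] (by omega) (by omega),
            show pvScanLine chars chars.length (index + 2) - index
              = (pvScanLine chars chars.length (index + 2) - (index + 2)) + 2 by omega]
          simp [List.replicate_succ, List.append_assoc]
        · by_cases h2 : chars.getD index ' ' = '/' ∧ index + 1 < chars.length ∧ chars.getD (index + 1) ' ' = '*'
          · have hge := pvScanBlock_ge chars chars.length (index + 2)
            have hle : min chars.length (pvScanBlock chars chars.length (index + 2) + 2) ≤ chars.length := by omega
            conv_lhs => rw [pvMaskA]
            simp only [if_pos hi]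
            rw [if_neg h1, if_pos h2,
              ih (pvFill chars index (min chars.length (pvScanBlock chars chars.length (index + 2) + 2) - index))
                (min chars.length (pvScanBlock chars chars.length (index + 2) + 2))
                (by rw [pvFill_length]; omega)]
            have ht := pvFill_take chars index (min chars.length (pvScanBlock chars chars.length (index + 2) + 2) - index) (by omega)
            rw [show index + (min chars.length (pvScanBlock chars chars.length (index + 2) + 2) - index)
                  = min chars.length (pvScanBlock chars chars.length (index + 2) + 2) by omega] at ht
            rw [ht,
              pvMaskB_congr _ chars .normal fuel _ [] (pvFill_length _ _ _)
                (fun k hk => pvFill_getD_ge _ _ _ _ (by omega))]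
            conv_rhs => rw [pvMaskB]
            simp only [if_pos hi]
            rw [if_neg h1, if_pos h2]
            conv_rhs => rw [pvMaskB_out, pvBlock_bridge chars fuel (index + 2) (by omega)]
            rw [pvScanBlock_irrel chars fuel chars.length (index + 2) (by omega) (by omega),
              pvMaskB_irrel chars .normal fuel chars.length (min chars.length (pvScanBlock chars chars.length (index + 2) + 2)) [] (by omega) (by omega),
              show min chars.length (pvScanBlock chars chars.length (index + 2) + 2) - index
                = (min chars.length (pvScanBlock chars chars.length (index + 2) + 2) - (index + 2)) + 2 by omega]
            simp [List.replicate_succ, List.append_assoc]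
          · by_cases h3 : chars.getD index ' ' = '\''
            · have hge := pvScanStr_ge chars chars.length (index + 1)
              have hle := pvScanStr_le chars chars.length (index + 1) (by omega)
              have hmin : min (pvScanStr chars chars.length (index + 1)) chars.length
                  = pvScanStr chars chars.length (index + 1) := by omega
              conv_lhs => rw [pvMaskA]
              simp only [if_pos hi]
              rw [if_neg h1, if_neg h2, if_pos h3, hmin,
                ih (pvFill chars index (pvScanStr chars chars.length (index + 1) - index))
                  (pvScanStr chars chars.length (index + 1))
                  (by rw [pvFill_length]; omega)]
              have ht := pvFill_take chars index (pvScanStr chars chars.length (index + 1) - index) (by omega)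
              rw [show index + (pvScanStr chars chars.length (index + 1) - index)
                    = pvScanStr chars chars.length (index + 1) by omega] at ht
              rw [ht,
                pvMaskB_congr _ chars .normal fuel _ [] (pvFill_length _ _ _)
                  (fun k hk => pvFill_getD_ge _ _ _ _ (by omega))]
              conv_rhs => rw [pvMaskB]
              simp only [if_pos hi]
              rw [if_neg h1, if_neg h2, if_pos h3]
              conv_rhs => rw [pvMaskB_out, pvStr_bridge chars fuel (index + 1) (by omega)]
              rw [pvScanStr_irrel chars fuel chars.length (index + 1) (by omega) (by omega),
                pvMaskB_irrel chars .normal fuel chars.length (pvScanStr chars chars.length (index + 1)) [] (by omega) (by omega),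
                show pvScanStr chars chars.length (index + 1) - index
                  = (pvScanStr chars chars.length (index + 1) - (index + 1)) + 1 by omega]
              simp [List.replicate_succ, List.append_assoc]
            · conv_lhs => rw [pvMaskA]
              simp only [if_pos hi]
              rw [if_neg h1, if_neg h2, if_neg h3, ih chars (index + 1) (by omega)]
              conv_rhs => rw [pvMaskB]
              simp only [if_pos hi]
              rw [if_neg h1, if_neg h2, if_neg h3]
              conv_rhs => rw [pvMaskB_out]
              have hc : chars[index]? = some (chars.getD index ' ') := by
                simp [List.getD_eq_getElem?_getD, List.getElem?_eq_getElem hi]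
              rw [List.take_add_one, hc]
              simp [List.append_assoc]
      · conv_lhs => rw [pvMaskA]
        rw [if_neg hi, pvMaskB_stop _ _ _ _ _ (by omega),
          List.take_of_length_le (by omega : chars.length ≤ index)]
        simp

-- ===== VERDICT (by name: the statement is the Claim_ definition above) =====
theorem mask_sql_comments_and_literals_py_spec : Claim_equal_mask_sql_comments_and_literals_py := by
  intro query _
  unfold Spec_mask_sql_comments_and_literals_py mask_sql_comments_and_literals_py mask_sql_comments_and_literals_py_alt
  rw [pvMask_main query.toList query.toList.length 0 (by omega), List.take_zero, List.nil_append]
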